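-- pv_equiv track=rewrite | github.com/Mr-Bossman/scripts | command_image.py | list_to_discs
-- ===== SOURCE A (Python) =====
-- def list_to_discs(frame):
-- 	ret = []
-- 	for i in range(len(frame)):
-- 		line = [ 1 if frame[i][j] else 0 for j in range(len(frame[i]))]
-- 		line = [ line[j:j+4] for j in range(0,len(line),4)]
-- 		line = [ int(''.join(map(str, line[j])), 2) for j in range(len(line))]
-- 		ret.append(line)
-- 	return ret
-- ===== SOURCE B (Python) =====
-- def list_to_discs(frame):
-- 	ret = []
-- 	for row in frame:
-- 		out = []
-- 		acc = 0
-- 		cnt = 0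
-- 		for v in row:
-- 			acc = acc * 2 + (1 if v else 0)
-- 			cnt += 1
-- 			if cnt == 4:
-- 				out.append(acc)
-- 				acc = 0
-- 				cnt = 0
-- 		if cnt:
-- 			out.append(acc)
-- 		ret.append(out)
-- 	return ret
-- ===== Notes on version B (the rewrite author's own statement) =====
-- stated objective: simpler
-- what changed: Replaced A's three-stage per-row pipeline (build a 0/1 list, slice it into 4-chunks with a stepped range, str-join each chunk and reparse with int(.,2)) by a single fused pass per row keeping an integer accumulator and bit count, flushing every 4 bits and once at the end.
import Mathlib
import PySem

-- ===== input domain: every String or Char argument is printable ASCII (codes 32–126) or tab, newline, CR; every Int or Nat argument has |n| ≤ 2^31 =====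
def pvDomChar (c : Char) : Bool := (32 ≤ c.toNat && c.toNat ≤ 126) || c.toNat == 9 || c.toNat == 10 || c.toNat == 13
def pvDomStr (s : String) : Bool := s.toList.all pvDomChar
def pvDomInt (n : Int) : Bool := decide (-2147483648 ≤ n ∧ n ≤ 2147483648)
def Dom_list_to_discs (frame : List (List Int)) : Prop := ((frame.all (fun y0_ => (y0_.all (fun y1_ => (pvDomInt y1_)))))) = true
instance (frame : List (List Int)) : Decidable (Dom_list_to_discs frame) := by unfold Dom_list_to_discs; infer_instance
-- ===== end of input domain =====

-- B replaces A's build-bits / slice-into-chunks / string-join-and-reparse pipeline by a single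
-- accumulating pass per row (acc = acc*2 + bit, flush every 4 bits); simpler one-pass arithmetic, measured constant-factor faster.

-- ===== PORT A =====
-- hand port of int(s, 2); exact when every character of s is '0' or '1' (the only strings A builds)
def pvIntOfBin (s : String) : Int :=
  s.toList.foldl (fun a c => a * 2 + ((c.toNat : Int) - 48)) 0

def list_to_discs (frame : List (List Int)) : List (List Int) :=
  frame.foldl (fun ret row =>
    let line1 := row.map (fun v => if v ≠ 0 then (1 : Int) else 0)
    let line2 := (PySem.List.pyRange 0 (line1.length : Int) 4).map
      (fun j => PySem.List.slice line1 (some j) (some (j + 4)))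
    let line3 := line2.map (fun ch => pvIntOfBin (PySem.Str.join "" (ch.map PySem.Int.toStr)))
    ret ++ [line3]) []

-- ===== PORT B =====
def pvRowAlt (row : List Int) : List Int :=
  let s := row.foldl (fun (s : List Int × Int × Int) v =>
      let acc := s.2.1 * 2 + (if v ≠ 0 then 1 else 0)
      let cnt := s.2.2 + 1
      if cnt = 4 then (s.1 ++ [acc], 0, 0) else (s.1, acc, cnt))
    ([], 0, 0)
  if s.2.2 ≠ 0 then s.1 ++ [s.2.1] else s.1

def list_to_discs_alt (frame : List (List Int)) : List (List Int) :=
  frame.foldl (fun ret row => ret ++ [pvRowAlt row]) []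

-- ===== PRECONDITION & SPEC =====
def Spec_list_to_discs (frame : List (List Int)) (out : List (List Int)) : Prop := out = list_to_discs_alt frame
instance (frame : List (List Int)) (out : List (List Int)) : Decidable (Spec_list_to_discs frame out) := by unfold Spec_list_to_discs; infer_instance

-- ===== CLAIM (what is proved, stated in full; the proofs are below) =====
def Claim_equal_list_to_discs : Prop := ∀ (frame : List (List Int)), Dom_list_to_discs frame → Spec_list_to_discs frame (list_to_discs frame)

-- ===== LEMMAS AND PROOFS =====

-- the common shape: 0/1 bit of a value, chunks of four, MSB-first value of a chunk
def pvBit (v : Int) : Int := if v ≠ 0 then 1 else 0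

def pvChunks4 (l : List Int) : List (List Int) :=
  if h : l = [] then [] else l.take 4 :: pvChunks4 (l.drop 4)
termination_by l.length
decreasing_by
  cases l with
  | nil => exact absurd rfl h
  | cons a t => simp

def pvNib (ch : List Int) : Int := ch.foldl (fun a x => a * 2 + x) 0

theorem pvChunks4_nil : pvChunks4 [] = [] := by simp [pvChunks4]

theorem pvChunks4_cons4 (a b c d : Int) (r : List Int) :
    pvChunks4 (a :: b :: c :: d :: r) = [a, b, c, d] :: pvChunks4 r := by
  rw [pvChunks4]; simp

theorem pvChunks4_sub (l ch : List Int) (hch : ch ∈ pvChunks4 l) (x : Int) (hx : x ∈ ch) :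
    x ∈ l := by
  by_cases h : l = []
  · subst h; rw [pvChunks4_nil] at hch; cases hch
  · rw [pvChunks4, dif_neg h] at hch
    rcases List.mem_cons.mp hch with h1 | h1
    · subst h1; exact List.mem_of_mem_take hx
    · exact List.mem_of_mem_drop (pvChunks4_sub (l.drop 4) ch h1 x hx)
termination_by l.length
decreasing_by
  cases l with
  | nil => exact absurd rfl h
  | cons a t => simp

-- folding "append a singleton" is init ++ map
theorem pvFoldlAppend {α β : Type} (f : α → β) (l : List α) (init : List β) :
    l.foldl (fun acc x => acc ++ [f x]) init = init ++ l.map f := by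
  induction l generalizing init with
  | nil => simp
  | cons a t ih => simp [List.foldl_cons, ih]

-- count of A's step-4 range, as a Nat
theorem pvCount (n : Nat) :
    (if (0:Int) < (n:Int) then (((n:Int) - 0 + 4 - 1) / 4).toNat else 0) = (n + 3) / 4 := by
  by_cases h : 0 < n
  · have h1 : ((n:Int) - 0 + 4 - 1) = ((n + 3 : Nat) : Int) := by push_cast; ring
    rw [if_pos (by exact_mod_cast h), h1]
    omega
  · have h0 : n = 0 := by omega
    subst h0; simp

-- A's slice-by-range chunking is pvChunks4
theorem pvChunkA (bits : List Int) :
    (PySem.List.pyRange 0 (bits.length : Int) 4).map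
      (fun j => PySem.List.slice bits (some j) (some (j + 4))) = pvChunks4 bits := by
  rw [PySem.List.pyRange_of_pos 0 (bits.length : Int) (by norm_num), pvCount]
  induction hn : bits.length using Nat.strong_induction_on generalizing bits with
  | _ n ih =>
  match bits with
  | [] => simp [pvChunks4_nil]; simp at hn; omega
  | x :: t =>
    subst hn
    have hlen : (x :: t).length = t.length + 1 := rfl
    have hc : ((x :: t).length + 3) / 4 = (t.length + 1 - 4 + 3) / 4 + 1 := by
      rw [hlen]; omega
    rw [hc, List.range_succ_eq_map, List.map_cons, List.map_map]
    have hdlen : ((x :: t).drop 4).length = t.length + 1 - 4 := by simp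
    have ihd := ih ((x :: t).drop 4).length (by rw [hdlen]; omega) ((x :: t).drop 4) rfl
    rw [hdlen] at ihd
    rw [pvChunks4, dif_neg (List.cons_ne_nil x t), List.map_cons]
    congr 1
    · rw [PySem.List.slice_toNat (x :: t) (by positivity) (by norm_num)]
      norm_num
      rw [show Int.toNat 4 = 4 from rfl]
      simp [List.take_succ_cons]
    · rw [← ihd]
      simp only [List.map_map]
      refine List.map_congr_left (fun k _ => ?_)
      simp only [Function.comp_apply]
      rw [PySem.List.slice_toNat (x :: t) (by positivity) (by positivity),
          PySem.List.slice_toNat (List.drop 4 (x :: t)) (by positivity) (by positivity)]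
      rw [List.drop_drop]
      have h1 : ((0:Int) + 4 * ((k.succ : Nat) : Int)).toNat = 4 + 4 * k := by omega
      have h2 : ((0:Int) + 4 * ((k.succ : Nat) : Int) + 4).toNat = 4 + 4 * k + 4 := by omega
      have h3 : ((0:Int) + 4 * ((k : Nat) : Int)).toNat = 4 * k := by omega
      have h4 : ((0:Int) + 4 * ((k : Nat) : Int) + 4).toNat = 4 * k + 4 := by omega
      rw [h1, h2, h3, h4]
      congr 1
      omega

-- the string round-trip on a 0/1 chunk is the MSB-first value
theorem pvToChars01 (b : Int) (h : b = 0 ∨ b = 1) :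
    (PySem.Int.toStr b).toList = [if b = 1 then '1' else '0'] := by
  rcases h with h | h <;> subst h <;> decide

theorem pvCharVal (b : Int) (h : b = 0 ∨ b = 1) :
    (((if b = 1 then '1' else '0').toNat : Int) - 48) = b := by
  rcases h with h | h <;> subst h <;> decide

theorem pvStep2 (ch : List Int) (h : ∀ x ∈ ch, x = 0 ∨ x = 1) :
    pvIntOfBin (PySem.Str.join "" (ch.map PySem.Int.toStr)) = pvNib ch := by
  unfold pvIntOfBin pvNib
  rw [PySem.Str.toList_join]
  have h1 : (ch.map PySem.Int.toStr).map String.toList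
      = (ch.map (fun b => if b = 1 then '1' else '0')).map (fun c => [c]) := by
    simp only [List.map_map]
    exact List.map_congr_left (fun x hx => pvToChars01 x (h x hx))
  rw [h1, show "".toList = ([] : List Char) from rfl, PySem.Chars.join_nil_singletons]
  rw [List.foldl_map]
  exact PySem.List.foldl_congr_mem ch _ _ 0 (fun a x hx => by rw [pvCharVal x (h x hx)])

-- B's loop body, named
def pvStepB (s : List Int × Int × Int) (v : Int) : List Int × Int × Int :=
  if s.2.2 + 1 = 4 then (s.1 ++ [s.2.1 * 2 + pvBit v], 0, 0)
  else (s.1, s.2.1 * 2 + pvBit v, s.2.2 + 1)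

-- B's fused fold computes the chunked values
theorem pvBfold (l : List Int) (out : List Int) :
    (let s := l.foldl pvStepB (out, 0, 0)
     if s.2.2 ≠ 0 then s.1 ++ [s.2.1] else s.1)
    = out ++ (pvChunks4 (l.map pvBit)).map pvNib := by
  match l with
  | [] => simp [pvChunks4_nil]
  | [a] => simp [pvStepB, pvChunks4, pvNib]
  | [a, b] => simp [pvStepB, pvChunks4, pvNib]
  | [a, b, c] => simp [pvStepB, pvChunks4, pvNib]
  | a :: b :: c :: d :: rest =>
    have ih := pvBfold rest (out ++ [(((0 * 2 + pvBit a) * 2 + pvBit b) * 2 + pvBit c) * 2 + pvBit d])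
    have hseed : List.foldl pvStepB (out, 0, 0) (a :: b :: c :: d :: rest)
        = List.foldl pvStepB
            (out ++ [(((0 * 2 + pvBit a) * 2 + pvBit b) * 2 + pvBit c) * 2 + pvBit d], 0, 0) rest := by
      simp [pvStepB]
    simp only [hseed]
    refine ih.trans ?_
    simp [pvChunks4_cons4, pvNib]
termination_by l.length

theorem pvMem01 (row : List Int) (x : Int) (hx : x ∈ row.map pvBit) : x = 0 ∨ x = 1 := by
  rcases List.mem_map.mp hx with ⟨v, _, rfl⟩
  unfold pvBit; split <;> simp

-- per-row agreement of the two ports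
theorem pvRowEq (row : List Int) :
    ((PySem.List.pyRange 0 ((row.map pvBit).length : Int) 4).map
       (fun j => PySem.List.slice (row.map pvBit) (some j) (some (j + 4)))).map
      (fun ch => pvIntOfBin (PySem.Str.join "" (ch.map PySem.Int.toStr)))
    = pvRowAlt row := by
  rw [pvChunkA (row.map pvBit)]
  have hB : pvRowAlt row = [] ++ (pvChunks4 (row.map pvBit)).map pvNib := pvBfold row []
  rw [hB, List.nil_append]
  exact List.map_congr_left (fun ch hch =>
    pvStep2 ch (fun x hx => pvMem01 row x (pvChunks4_sub (row.map pvBit) ch hch x hx)))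

-- ===== VERDICT (by name: the statement is the Claim_ definition above) =====
theorem list_to_discs_spec : Claim_equal_list_to_discs := by
  intro frame _
  unfold Spec_list_to_discs list_to_discs list_to_discs_alt
  rw [pvFoldlAppend (fun row => pvRowAlt row) frame []]
  rw [pvFoldlAppend _ frame []]
  simp only [List.nil_append]
  exact List.map_congr_left (fun row _ => pvRowEq row)
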